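-- pv_equiv track=rewrite | github.com/pypi-data/pypi-mirror-2 | packages/binstr/binstr-1.0.tar.gz/binstr-1.0/binstr.py | b_nxor
-- ===== SOURCE A (Python) =====
-- def b_nxor(A='00000000', B='00000000', align='right'): # {{{
--     '''
--     Perform a bitwise NXOR on two strings of binary digits, A and B.
--     The align argument can be used to align the shortest of A and B to one
--       side of the other.
--     The returned string is the same length as the longest input.
--     E.g. b_or('0101', '0011') returns '1001'
--          b_or('01010000', '0011') returns '10101100'
--          b_or('01010000', '0011', align='left') returns '10011111'
--     '''
--     assert type(A) is str, 'A is not a string: %s' % str(A)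
--     assert type(B) is str, 'B is not a string: %s' % str(B)
--     assert type(align) is str, 'align is not a string: %s' % str(align)
--
--     assert len(A) >= 1, 'A has no digits'
--     assert len(B) >= 1, 'B has no digits'
--     assert align == 'right' or align == 'left', 'Invalid align: \'%s\'. Use either \'right\' or \'left\'' % align
--
--     from re import compile as re_compile
--     pattern = re_compile('[^01]')
--     assert bool(pattern.search(A)) == False, 'Invalid A: \'%s\'. Must only contain \'0\'s or \'1\'s.' % A
--     assert bool(pattern.search(B)) == False, 'Invalid B: \'%s\'. Must only contain \'0\'s or \'1\'s.' % B
--     del re_compile, pattern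
--
--     if len(A) >= len(B): (p, q) = (A, B)
--     else:                (p, q) = (B, A)
--     del A, B
--
--     if align == 'right': q = '0'*(len(p) - len(q)) + q
--     else:                q = q + '0'*(len(p) - len(q))
--     assert len(p) == len(q), 'Error in this function! len(p) must equal len(q). Oh dear.'
--
--     return ''.join([str(int( not( bool(int(a)) ^ bool(int(b)) ) )) for (a, b) in zip(p, q)])
-- ===== SOURCE B (Python) =====
-- def b_nxor(A='00000000', B='00000000', align='right'): # {{{
--     '''
--     Bitwise NXOR of two binary strings via integer arithmetic:
--     XOR the values and invert within the output width.
--     '''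
--     assert type(A) is str, 'A is not a string: %s' % str(A)
--     assert type(B) is str, 'B is not a string: %s' % str(B)
--     assert type(align) is str, 'align is not a string: %s' % str(align)
--
--     assert len(A) >= 1, 'A has no digits'
--     assert len(B) >= 1, 'B has no digits'
--     assert align == 'right' or align == 'left', 'Invalid align: \'%s\'. Use either \'right\' or \'left\'' % align
--
--     assert set(A) <= {'0', '1'}, 'Invalid A: \'%s\'. Must only contain \'0\'s or \'1\'s.' % A
--     assert set(B) <= {'0', '1'}, 'Invalid B: \'%s\'. Must only contain \'0\'s or \'1\'s.' % B
--
--     n = max(len(A), len(B))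
--     if align == 'left':
--         A = A.ljust(n, '0')
--         B = B.ljust(n, '0')
--     x = int(A, 2)
--     y = int(B, 2)
--     mask = (1 << n) - 1
--     return format(mask ^ x ^ y, '0{}b'.format(n))
-- ===== Notes on version B (the rewrite author's own statement) =====
-- stated objective: alternative
-- what changed: Replaces the pad-then-zip per-character boolean comprehension with integer arithmetic: both strings are converted to numbers (Horner), a single XOR is inverted inside an n-bit mask, and the result's bits are read back out by position.
import Mathlib
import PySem

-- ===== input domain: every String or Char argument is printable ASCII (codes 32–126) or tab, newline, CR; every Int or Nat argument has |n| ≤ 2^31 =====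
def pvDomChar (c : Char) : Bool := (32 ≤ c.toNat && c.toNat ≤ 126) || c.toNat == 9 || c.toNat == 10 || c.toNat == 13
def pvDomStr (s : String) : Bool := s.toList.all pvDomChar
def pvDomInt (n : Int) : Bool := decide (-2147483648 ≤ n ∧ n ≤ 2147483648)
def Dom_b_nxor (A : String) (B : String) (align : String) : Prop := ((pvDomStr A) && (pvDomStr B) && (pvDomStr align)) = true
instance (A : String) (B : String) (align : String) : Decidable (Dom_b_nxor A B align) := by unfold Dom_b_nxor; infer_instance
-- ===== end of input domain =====

-- B replaces A's per-character zip comprehension by integer arithmetic: convert both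
-- strings to numbers, take one XOR, invert inside an n-bit mask, read the bits back out
-- (objective: alternative — a different algorithm of similar cost).

-- ===== PORT A =====
-- ''.join([str(int(not(bool(int(a)) ^ bool(int(b))))) for (a,b) in zip(p,q)])
-- (inside Pre_ each character is '0' or '1', so bool(int(c)) = (c = '1'))
def b_nxor (A : String) (B : String) (align : String) : String :=
  let pq := if A.toList.length ≥ B.toList.length then (A.toList, B.toList) else (B.toList, A.toList)
  let p := pq.1
  let q := if align = "right" then List.replicate (p.length - pq.2.length) '0' ++ pq.2
           else pq.2 ++ List.replicate (p.length - pq.2.length) '0'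
  String.mk ((p.zip q).map (fun ab => if (ab.1 == '1') ^^ (ab.2 == '1') then '0' else '1'))

-- ===== PORT B =====
-- Horner loop 'x = 2*x + (c == '1')' ported as a foldl; all values are nonnegative Python
-- ints, so Nat arithmetic is exact ((1 << n) - 1 ≥ 0, and n-1-i ≥ 0 for i in range(n)).
def b_nxor_alt (A : String) (B : String) (align : String) : String :=
  let n := max A.toList.length B.toList.length
  let la := if align = "left" then A.toList ++ List.replicate (n - A.toList.length) '0' else A.toList
  let lb := if align = "left" then B.toList ++ List.replicate (n - B.toList.length) '0' else B.toList
  let x := la.foldl (fun x c => 2 * x + (if c = '1' then 1 else 0)) 0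
  let y := lb.foldl (fun y c => 2 * y + (if c = '1' then 1 else 0)) 0
  let v := ((1 <<< n) - 1) ^^^ x ^^^ y
  String.mk ((List.range n).map (fun i => if (v >>> (n - 1 - i)) &&& 1 ≠ 0 then '1' else '0'))

-- ===== PRECONDITION & SPEC =====
-- Pre_ is exactly where A's assertions pass: nonempty binary strings, align 'right' or
-- 'left'; on all other inputs A raises AssertionError.
def Pre_b_nxor (A : String) (B : String) (align : String) : Prop :=
  1 ≤ A.toList.length ∧ 1 ≤ B.toList.length ∧ (align = "right" ∨ align = "left") ∧
  (A.toList.all fun c => c == '0' || c == '1') = true ∧ (B.toList.all fun c => c == '0' || c == '1') = true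
instance (A : String) (B : String) (align : String) : Decidable (Pre_b_nxor A B align) := by
  unfold Pre_b_nxor; infer_instance
def pvWitness_b_nxor : String × String × String := ("01", "1", "right")

def Spec_b_nxor (A : String) (B : String) (align : String) (out : String) : Prop := out = b_nxor_alt A B align
instance (A : String) (B : String) (align : String) (out : String) : Decidable (Spec_b_nxor A B align out) := by unfold Spec_b_nxor; infer_instance

-- ===== CLAIM (what is proved, stated in full; the proofs are below) =====
def Claim_equal_b_nxor : Prop := ∀ (A : String) (B : String) (align : String), Dom_b_nxor A B align → Pre_b_nxor A B align → Spec_b_nxor A B align (b_nxor A B align)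

-- ===== LEMMAS AND PROOFS =====

-- the Horner value of a list of characters ('1' counts 1, anything else 0)
def pvBinVal (cs : List Char) : Nat :=
  cs.foldl (fun x c => 2 * x + (if c = '1' then 1 else 0)) 0

lemma pvBinVal_concat (cs : List Char) (c : Char) :
    pvBinVal (cs ++ [c]) = 2 * pvBinVal cs + (if c = '1' then 1 else 0) := by
  simp [pvBinVal, List.foldl_append]

lemma pvBinVal_testBit (cs : List Char) (j : Nat) :
    (pvBinVal cs).testBit j = decide (cs.reverse.getD j '0' = '1') := by
  induction cs using List.reverseRecOn generalizing j with
  | nil => simp [pvBinVal]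
  | append_singleton cs c ih =>
    rw [pvBinVal_concat]
    cases j with
    | zero =>
      simp only [Nat.testBit_zero, List.reverse_append, List.reverse_cons, List.reverse_nil,
        List.nil_append, List.cons_append, List.getD_cons_zero]
      split <;> simp_all
    | succ j =>
      rw [Nat.testBit_succ]
      have h2 : (2 * pvBinVal cs + (if c = '1' then 1 else 0)) / 2 = pvBinVal cs := by
        split <;> omega
      rw [h2, ih]
      simp [List.reverse_append]

-- reading a length-n list from the right at n-1-i is reading it from the left at i
lemma pvGetD_rev (L : List Char) (n i : Nat) (hL : L.length = n) (hi : i < n) :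
    L.reverse.getD (n - 1 - i) '0' = L.getD i '0' := by
  have h1 : n - 1 - i < L.reverse.length := by simp [hL]; omega
  have h2 : i < L.length := by omega
  rw [List.getD_eq_getElem _ _ h1, List.getD_eq_getElem _ _ h2, List.getElem_reverse]
  congr 1
  simp [hL]; omega

-- a left-zero-padded list read from the right ignores the padding
lemma pvGetD_rev_pad (cs : List Char) (n i : Nat) (hlen : cs.length ≤ n) (hi : i < n) :
    (List.replicate (n - cs.length) '0' ++ cs).getD i '0' = cs.reverse.getD (n - 1 - i) '0' := by
  by_cases h : i < n - cs.length
  · rw [List.getD_append _ _ _ _ (by simp; omega), List.getD_eq_getElem _ _ (by simp; omega)]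
    have : ¬ (n - 1 - i < cs.reverse.length) := by simp; omega
    rw [List.getD_eq_default _ _ (by simp; omega)]
    simp
  · have hl : i < (List.replicate (n - cs.length) '0' ++ cs).length := by simp; omega
    rw [List.getD_eq_getElem _ _ hl, List.getD_eq_getElem _ _ (show n - 1 - i < cs.reverse.length by simp; omega),
      List.getElem_append_right (by simp; omega), List.getElem_reverse]
    congr 1
    simp; omega

-- the character of A's comprehension, as a function of the two aligned characters
def pvNx (a b : Char) : Char := if (a == '1') ^^ (b == '1') then '0' else '1'

-- A's full output, rewritten as a pointwise map over the two padded lists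
def pvPad (cs : List Char) (n : Nat) (align : String) : List Char :=
  if align = "right" then List.replicate (n - cs.length) '0' ++ cs
  else cs ++ List.replicate (n - cs.length) '0'

lemma pvPad_length (cs : List Char) (n : Nat) (align : String) (h : cs.length ≤ n) :
    (pvPad cs n align).length = n := by
  unfold pvPad; split <;> simp <;> omega

lemma b_nxor_eq_zip (A B align : String) :
    b_nxor A B align
      = String.mk (List.zipWith pvNx
          (pvPad A.toList (max A.toList.length B.toList.length) align)
          (pvPad B.toList (max A.toList.length B.toList.length) align)) := by
  unfold b_nxor
  have hcomm : ∀ x y, pvNx x y = pvNx y x := by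
    intro x y; unfold pvNx; rw [Bool.xor_comm]
  simp only [List.map_zip_eq_zipWith]
  have hcur : (Function.curry fun ab : Char × Char => if (ab.1 == '1') ^^ (ab.2 == '1') then '0' else '1') = pvNx := by
    funext a b; rfl
  by_cases h : A.toList.length ≥ B.toList.length
  · have hmax : max A.toList.length B.toList.length = A.toList.length := by omega
    simp only [h, if_pos, hmax, hcur]
    congr 1
    unfold pvPad
    simp
  · have hmax : max A.toList.length B.toList.length = B.toList.length := by omega
    simp only [if_neg h, hmax, hcur]
    rw [List.zipWith_comm_of_comm hcomm]
    congr 1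
    unfold pvPad
    simp

-- bit n-1-i of B's masked value is exactly A's character at position i
lemma pvV_testBit (A B align : String) (i : Nat)
    (hal : align = "right" ∨ align = "left")
    (hi : i < max A.toList.length B.toList.length) :
    (let n := max A.toList.length B.toList.length
     let la := if align = "left" then A.toList ++ List.replicate (n - A.toList.length) '0' else A.toList
     let lb := if align = "left" then B.toList ++ List.replicate (n - B.toList.length) '0' else B.toList
     (((1 <<< n) - 1) ^^^ pvBinVal la ^^^ pvBinVal lb).testBit (n - 1 - i))
      = !(((pvPad A.toList (max A.toList.length B.toList.length) align).getD i '0' == '1')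
          ^^ ((pvPad B.toList (max A.toList.length B.toList.length) align).getD i '0' == '1')) := by
  set n := max A.toList.length B.toList.length with hn
  have hA : A.toList.length ≤ n := le_max_left _ _
  have hB : B.toList.length ≤ n := le_max_right _ _
  have hj : n - 1 - i < n := by omega
  have key : ∀ (cs : List Char), cs.length ≤ n →
      (pvBinVal (if align = "left" then cs ++ List.replicate (n - cs.length) '0' else cs)).testBit (n - 1 - i)
        = ((pvPad cs n align).getD i '0' == '1') := by
    intro cs hcs
    rcases hal with hr | hl
    · subst hr
      rw [if_neg (by decide : ¬("right" : String) = "left"), pvBinVal_testBit]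
      unfold pvPad
      rw [if_pos rfl, pvGetD_rev_pad cs n i hcs hi]
      cases hdec : decide (cs.reverse.getD (n - 1 - i) '0' = '1') <;> simp_all
    · subst hl
      rw [if_pos rfl, pvBinVal_testBit]
      unfold pvPad
      rw [if_neg (by decide : ¬("left" : String) = "right")]
      rw [pvGetD_rev (cs ++ List.replicate (n - cs.length) '0') n i (by simp; omega) hi]
      cases hdec : decide ((cs ++ List.replicate (n - cs.length) '0').getD i '0' = '1') <;> simp_all
  simp only []
  rw [Nat.one_shiftLeft, Nat.testBit_xor, Nat.testBit_xor, Nat.testBit_two_pow_sub_one,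
    key A.toList hA, key B.toList hB]
  simp [hj]

-- ===== VERDICT (by name: the statement is the Claim_ definition above) =====
theorem b_nxor_spec : Claim_equal_b_nxor := by
  intro A B align _hdom hpre
  obtain ⟨hA1, hB1, hal, _hAbin, _hBbin⟩ := hpre
  unfold Spec_b_nxor
  rw [b_nxor_eq_zip]
  unfold b_nxor_alt
  simp only []
  set n := max A.toList.length B.toList.length with hn
  have hA : A.toList.length ≤ n := le_max_left _ _
  have hB : B.toList.length ≤ n := le_max_right _ _
  congr 1
  apply List.ext_getElem
  · rw [List.length_zipWith, pvPad_length _ _ _ hA, pvPad_length _ _ _ hB]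
    simp
  · intro i h1 h2
    have hi : i < n := by simpa using h2
    rw [List.getElem_zipWith, List.getElem_map, List.getElem_range]
    have hv := pvV_testBit A B align i hal hi
    simp only [] at hv
    have hcond : ∀ v k : Nat, ((v >>> k) &&& 1 ≠ 0 ↔ v.testBit k = true) := by
      intro v k
      simp [Nat.testBit, Nat.and_one_is_mod]
    simp only [hcond]
    rw [show List.foldl (fun x c => 2 * x + if c = '1' then 1 else 0) 0
          (if align = "left" then A.toList ++ List.replicate (n - A.toList.length) '0' else A.toList)
        = pvBinVal (if align = "left" then A.toList ++ List.replicate (n - A.toList.length) '0' else A.toList) from rfl]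
    rw [show List.foldl (fun y c => 2 * y + if c = '1' then 1 else 0) 0
          (if align = "left" then B.toList ++ List.replicate (n - B.toList.length) '0' else B.toList)
        = pvBinVal (if align = "left" then B.toList ++ List.replicate (n - B.toList.length) '0' else B.toList) from rfl]
    rw [hv]
    rw [List.getD_eq_getElem _ _ (show i < (pvPad A.toList n align).length by rw [pvPad_length _ _ _ hA]; exact hi),
        List.getD_eq_getElem _ _ (show i < (pvPad B.toList n align).length by rw [pvPad_length _ _ _ hB]; exact hi)]
    unfold pvNx
    cases ((pvPad A.toList n align)[i]'(by rw [pvPad_length _ _ _ hA]; exact hi) == '1') <;>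
      cases ((pvPad B.toList n align)[i]'(by rw [pvPad_length _ _ _ hB]; exact hi) == '1') <;>
      simp
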